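-- pv_equiv track=rewrite | github.com/kirinama8910-lang/PsyCard | src/docx/docx_reader.py | find_field_value
-- ===== SOURCE A (Python) =====
-- def _is_section_header(row: list[str]) -> bool:
--     """
--     Строка считается заголовком или меткой-разделителем если:
--     - одна ячейка: текст КАПС или короткий с ":"
--     - несколько ячеек: все ячейки короткие и заканчиваются на ":"
--     """
--     if not row:
--         return False
--     if len(row) == 1:
--         text = row[0]
--         return text.isupper() or (len(text) < 60 and text.endswith(":"))
--     # Многоячеечная строка — все ячейки выглядят как метки
--     return all(len(c) < 60 and c.endswith(":") for c in row)
--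
-- def find_field_value(
--     rows: list[list[str]],
--     label: str,
-- ) -> list[list[str]]:
--     """
--     Ищет строку-метку, содержащую label в первой ячейке,
--     и возвращает строки данных до следующего заголовка секции.
--     Саму строку-метку в результат не включает.
--     """
--     result = []
--     found = False
--     for row in rows:
--         if not found:
--             if row and label in row[0]:
--                 found = True
--         else:
--             if _is_section_header(row):
--                 break
--             result.append(row)
--     return result
-- ===== SOURCE B (Python) =====
-- def _is_section_header(row: list[str]) -> bool:
--     if not row:
--         return False
--     if len(row) == 1:
--         text = row[0]
--         return text.isupper() or (len(text) < 60 and text.endswith(":"))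
--     return all(len(c) < 60 and c.endswith(":") for c in row)
--
-- def _segments(rows: list[list[str]]) -> list[list[list[str]]]:
--     """Partition rows into sections: a new section starts at every header row."""
--     segs, cur = [], []
--     for row in rows:
--         if _is_section_header(row) and cur:
--             segs.append(cur)
--             cur = []
--         cur.append(row)
--     if cur:
--         segs.append(cur)
--     return segs
--
-- def find_field_value(
--     rows: list[list[str]],
--     label: str,
-- ) -> list[list[str]]:
--     # section-based: the data rows after the label row up to the next header
--     # are exactly the remainder of the section containing the first label row
--     for seg in _segments(rows):
--         for k, row in enumerate(seg):
--             if row and label in row[0]: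
--                 return seg[k + 1:]
--     return []
-- ===== Notes on version B (the rewrite author's own statement) =====
-- stated objective: alternative
-- what changed: Replaced A's one-pass boolean-flag state machine by a section-structure algorithm: first partition the rows into header-delimited sections (a new section starts at every header row), then return the remainder of the section containing the first label row.
import Mathlib
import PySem

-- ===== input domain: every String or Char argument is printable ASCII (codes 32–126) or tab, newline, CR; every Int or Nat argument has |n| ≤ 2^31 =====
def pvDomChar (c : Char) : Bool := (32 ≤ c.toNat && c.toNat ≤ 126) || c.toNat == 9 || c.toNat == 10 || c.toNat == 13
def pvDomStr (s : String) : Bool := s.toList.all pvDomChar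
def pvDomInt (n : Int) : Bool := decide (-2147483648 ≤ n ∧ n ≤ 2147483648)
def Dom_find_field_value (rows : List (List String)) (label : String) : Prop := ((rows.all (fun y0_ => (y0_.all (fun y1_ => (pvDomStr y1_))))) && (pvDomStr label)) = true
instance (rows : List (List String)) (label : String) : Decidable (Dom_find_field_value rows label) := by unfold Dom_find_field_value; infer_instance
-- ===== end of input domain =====

-- B replaces A's one-pass boolean-flag loop by a section-structure algorithm: partition
-- the rows into header-delimited sections, then return the remainder of the section
-- containing the first label row; objective: alternative (same cost, different structure).

-- ===== PORT A =====
-- str.isupper(): hand-ported (no PySem string-level isupper); exact on the ASCII domain,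
-- where the cased characters are exactly the alphabetic ones.
def strIsupper (s : String) : Bool :=
  (s.toList.any (fun c => PySem.Chars.isalpha c)) && (s.toList.all (fun c => !(PySem.Chars.islower c)))

def isSectionHeader (row : List String) : Bool :=
  match row with
  | [] => false
  | [text] => strIsupper text || (decide (PySem.Str.len text < 60) && PySem.Str.endswith text ":")
  | _ => row.all (fun c => decide (PySem.Str.len c < 60) && PySem.Str.endswith c ":")

def findLoop (label : String) : List (List String) → Bool → List (List String)
  | [], _ => []
  | row :: rest, found =>
    if found then
      if isSectionHeader row then []
      else row :: findLoop label rest true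
    else
      match row with
      | [] => findLoop label rest false
      | r0 :: _ =>
        if PySem.Str.isIn label r0 then findLoop label rest true
        else findLoop label rest false

def find_field_value (rows : List (List String)) (label : String) : List (List String) :=
  findLoop label rows false

-- ===== PORT B =====
-- B reuses the unchanged _is_section_header helper (isSectionHeader above).
def segLoop (segs : List (List (List String))) (cur : List (List String)) :
    List (List String) → List (List (List String))
  | [] => if cur.isEmpty then segs else segs ++ [cur]
  | row :: rest =>
    if isSectionHeader row && !cur.isEmpty then segLoop (segs ++ [cur]) [row] rest
    else segLoop segs (cur ++ [row]) rest

def segmentsB (rows : List (List String)) : List (List (List String)) :=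
  segLoop [] [] rows

def labelRowB (label : String) (row : List String) : Bool :=
  !row.isEmpty && PySem.Str.isIn label (row.headD "")

def searchSegs (label : String) : List (List (List String)) → List (List String)
  | [] => []
  | seg :: ss =>
    match seg.findIdx? (labelRowB label) with
    | some k => seg.drop (k + 1)
    | none => searchSegs label ss

def find_field_value_alt (rows : List (List String)) (label : String) : List (List String) :=
  searchSegs label (segmentsB rows)

-- ===== PRECONDITION & SPEC =====
def Spec_find_field_value (rows : List (List String)) (label : String) (out : List (List String)) : Prop := out = find_field_value_alt rows label
instance (rows : List (List String)) (label : String) (out : List (List String)) : Decidable (Spec_find_field_value rows label out) := by unfold Spec_find_field_value; infer_instance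

-- ===== CLAIM =====
def Claim_equal_find_field_value : Prop := ∀ (rows : List (List String)) (label : String), Dom_find_field_value rows label → Spec_find_field_value rows label (find_field_value rows label)

-- ===== LEMMAS AND PROOFS =====

-- Reference recursive segmentation (proof-side only): same partition as segLoop.
def segRec : List (List String) → List (List (List String))
  | [] => []
  | x :: xs =>
    match segRec xs with
    | (r :: s) :: ss =>
      if isSectionHeader r then [x] :: (r :: s) :: ss
      else (x :: r :: s) :: ss
    | [] :: ss => [x] :: [] :: ss
    | [] => [[x]]

def glue (cur : List (List String)) (X : List (List (List String))) : List (List (List String)) :=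
  if cur.isEmpty then X else
    match X with
    | (r :: s) :: ss => if isSectionHeader r then cur :: X else (cur ++ r :: s) :: ss
    | X' => cur :: X'

lemma glue_cons (x : List String) (xs : List (List String)) :
    glue [x] (segRec xs) = segRec (x :: xs) := by
  cases hX : segRec xs with
  | nil => simp [glue, segRec, hX]
  | cons seg ss =>
    cases seg with
    | nil => simp [glue, segRec, hX]
    | cons r s =>
      by_cases hr : isSectionHeader r = true
      · simp [glue, segRec, hX, hr]
      · simp only [Bool.not_eq_true] at hr
        simp [glue, segRec, hX, hr]

lemma glue_header (cur : List (List String)) (x : List String) (xs : List (List String))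
    (hc : cur ≠ []) (hh : isSectionHeader x = true) :
    glue cur (segRec (x :: xs)) = cur :: segRec (x :: xs) := by
  have hc' : cur.isEmpty = false := by simp [hc]
  cases hX : segRec xs with
  | nil => simp [glue, segRec, hX, hc', hh]
  | cons seg ss =>
    cases seg with
    | nil => simp [glue, segRec, hX, hc', hh]
    | cons r s =>
      by_cases hr : isSectionHeader r = true
      · simp [glue, segRec, hX, hr, hc', hh]
      · simp only [Bool.not_eq_true] at hr
        simp [glue, segRec, hX, hr, hc', hh]

lemma glue_snoc (cur : List (List String)) (x : List String) (xs : List (List String))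
    (hc : cur ≠ []) (hh : isSectionHeader x = false) :
    glue (cur ++ [x]) (segRec xs) = glue cur (segRec (x :: xs)) := by
  have hc' : cur.isEmpty = false := by simp [hc]
  have hcx : (cur ++ [x]).isEmpty = false := by simp
  cases hX : segRec xs with
  | nil => simp [glue, segRec, hX, hc', hcx, hh]
  | cons seg ss =>
    cases seg with
    | nil => simp [glue, segRec, hX, hc', hcx, hh]
    | cons r s =>
      by_cases hr : isSectionHeader r = true
      · simp [glue, segRec, hX, hr, hc', hcx, hh]
      · simp only [Bool.not_eq_true] at hr
        simp [glue, segRec, hX, hr, hc', hcx, hh]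

lemma segLoop_glue : ∀ (xs : List (List String)) (segs : List (List (List String))) (cur : List (List String)),
    segLoop segs cur xs = segs ++ glue cur (segRec xs) := by
  intro xs
  induction xs with
  | nil =>
    intro segs cur
    cases cur <;> simp [segLoop, glue, segRec]
  | cons x xs ih =>
    intro segs cur
    by_cases hc : cur = []
    · subst hc
      rw [show segLoop segs [] (x :: xs) = segLoop segs ([] ++ [x]) xs from by simp [segLoop]]
      rw [ih, List.nil_append, glue_cons]
      simp [glue]
    · have hc' : cur.isEmpty = false := by simp [hc]
      by_cases hh : isSectionHeader x = true
      · have : (isSectionHeader x && !cur.isEmpty) = true := by simp [hh, hc']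
        rw [show segLoop segs cur (x :: xs) = segLoop (segs ++ [cur]) [x] xs from by simp [segLoop, this]]
        rw [ih, glue_cons, glue_header cur x xs hc hh]
        simp
      · simp only [Bool.not_eq_true] at hh
        have : (isSectionHeader x && !cur.isEmpty) = false := by simp [hh]
        rw [show segLoop segs cur (x :: xs) = segLoop segs (cur ++ [x]) xs from by simp [segLoop, this]]
        rw [ih, glue_snoc cur x xs hc hh]

lemma segmentsB_eq (rows : List (List String)) : segmentsB rows = segRec rows := by
  unfold segmentsB
  rw [segLoop_glue rows [] []]
  simp [glue]

-- Invariant of the segmentation: segments are nonempty, only a segment's head can be a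
-- header, and every segment after the first starts with a header; flattening recovers rows.
def SegsOk (X : List (List (List String))) : Prop :=
  (∀ seg ∈ X, seg ≠ [] ∧ ∀ y ∈ seg.tail, isSectionHeader y = false) ∧
  (∀ seg ∈ X.tail, isSectionHeader (seg.headD []) = true)

lemma segRec_inv : ∀ xs : List (List String), SegsOk (segRec xs) ∧ (segRec xs).flatten = xs := by
  intro xs
  induction xs with
  | nil => exact ⟨⟨by simp [segRec], by simp [segRec]⟩, by simp [segRec]⟩
  | cons x xs ih =>
    obtain ⟨⟨hne, hhd⟩, hfl⟩ := ih
    cases hX : segRec xs with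
    | nil =>
      have hxs : xs = [] := by rw [hX] at hfl; simpa using hfl.symm
      subst hxs
      exact ⟨⟨by simp [segRec], by simp [segRec]⟩, by simp [segRec]⟩
    | cons seg ss =>
      rw [hX] at hne hhd hfl
      cases seg with
      | nil => exact absurd rfl (hne [] (by simp)).1
      | cons r s =>
        by_cases hr : isSectionHeader r = true
        · refine ⟨⟨?_, ?_⟩, ?_⟩
          · intro seg hseg
            simp only [segRec, hX, hr, if_true] at hseg
            rcases List.mem_cons.mp hseg with h | h
            · subst h; exact ⟨by simp, by simp⟩
            · exact hne seg h
          · intro seg hseg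
            simp only [segRec, hX, hr, if_true] at hseg
            rcases List.mem_cons.mp (by simpa using hseg) with h | h
            · subst h; simpa using hr
            · exact hhd seg h
          · simp only [segRec, hX, hr, if_true]
            simp only [List.flatten_cons] at hfl ⊢
            simp [hfl]
        · simp only [Bool.not_eq_true] at hr
          refine ⟨⟨?_, ?_⟩, ?_⟩
          · intro seg hseg
            simp only [segRec, hX, hr, Bool.false_eq_true, if_false] at hseg
            rcases List.mem_cons.mp hseg with h | h
            · subst h
              refine ⟨by simp, ?_⟩
              intro y hy
              rcases List.mem_cons.mp (by simpa using hy) with h' | h'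
              · subst h'; exact hr
              · exact (hne (r :: s) (by simp)).2 y h'
            · exact hne seg (List.mem_cons_of_mem _ h)
          · intro seg hseg
            simp only [segRec, hX, hr, Bool.false_eq_true, if_false] at hseg
            exact hhd seg (by simpa using hseg)
          · simp only [segRec, hX, hr, Bool.false_eq_true, if_false]
            simp only [List.flatten_cons] at hfl ⊢
            simp [hfl]

lemma findLoop_true (label : String) (xs : List (List String)) :
    findLoop label xs true = xs.takeWhile (fun r => !isSectionHeader r) := by
  induction xs with
  | nil => simp [findLoop]
  | cons row rest ih =>
    by_cases h : isSectionHeader row = true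
    · simp [findLoop, h]
    · simp only [Bool.not_eq_true] at h
      simp [findLoop, h, ih]

lemma takeWhile_append_all {α : Type} (p : α → Bool) (l m : List α)
    (h : ∀ a ∈ l, p a = true) : (l ++ m).takeWhile p = l ++ m.takeWhile p := by
  induction l with
  | nil => simp
  | cons a l ih =>
    simp [h a (by simp), ih (fun b hb => h b (by simp [hb]))]

lemma takeWhile_flatten_nil (ss : List (List (List String)))
    (h : ∀ seg ∈ ss, seg ≠ [] ∧ ∀ y ∈ seg.tail, isSectionHeader y = false)
    (hh : ∀ seg ∈ ss, isSectionHeader (seg.headD []) = true) :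
    ss.flatten.takeWhile (fun r => !isSectionHeader r) = [] := by
  cases ss with
  | nil => simp
  | cons seg ss' =>
    obtain ⟨hne, -⟩ := h seg (by simp)
    cases seg with
    | nil => exact absurd rfl hne
    | cons r s =>
      have hr : isSectionHeader r = true := by simpa using hh (r :: s) (by simp)
      simp [hr]

lemma searchSegs_shift (label : String) (x : List String) (seg : List (List String))
    (ss : List (List (List String))) (hx : labelRowB label x = false) :
    searchSegs label ((x :: seg) :: ss) = searchSegs label (seg :: ss) := by
  simp only [searchSegs, List.findIdx?_cons, hx]
  cases h : seg.findIdx? (labelRowB label) with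
  | none => simp
  | some k => simp

lemma main_eq (label : String) : ∀ xs : List (List String),
    searchSegs label (segRec xs) = findLoop label xs false := by
  intro xs
  induction xs with
  | nil => simp [segRec, searchSegs, findLoop]
  | cons x xs ih =>
    obtain ⟨⟨hne, hhd⟩, hfl⟩ := segRec_inv xs
    have hA : findLoop label (x :: xs) false =
        if labelRowB label x then findLoop label xs true else findLoop label xs false := by
      cases x with
      | nil => simp [findLoop, labelRowB]
      | cons r0 rs =>
        by_cases h : PySem.Str.isIn label r0 = true
        · simp [findLoop, labelRowB]
        · simp [findLoop, labelRowB]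
    rw [hA]
    cases hX : segRec xs with
    | nil =>
      have hxs : xs = [] := by
        have hfl' := hfl
        rw [hX] at hfl'
        simpa using hfl'.symm
      subst hxs
      by_cases hl : labelRowB label x = true
      · simp [segRec, searchSegs, List.findIdx?_cons, hl, findLoop]
      · simp only [Bool.not_eq_true] at hl
        simp [segRec, searchSegs, List.findIdx?_cons, hl, findLoop]
    | cons seg ss =>
      rw [hX] at hne hhd hfl
      cases seg with
      | nil => exact absurd rfl (hne [] (by simp)).1
      | cons r s =>
        by_cases hr : isSectionHeader r = true
        · -- x starts a fresh segment: segRec (x::xs) = [x] :: (r::s) :: ss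
          have hsx : segRec (x :: xs) = [x] :: (r :: s) :: ss := by simp [segRec, hX, hr]
          by_cases hl : labelRowB label x = true
          · rw [hsx, if_pos hl, findLoop_true, ← hfl]
            simp [searchSegs, List.findIdx?_cons, hl, hr]
          · simp only [Bool.not_eq_true] at hl
            rw [hsx, if_neg (by simp [hl])]
            have hstep : searchSegs label ([x] :: (r :: s) :: ss) = searchSegs label ((r :: s) :: ss) := by
              simp [searchSegs, List.findIdx?_cons, hl]
            rw [hstep, ← hX]
            exact ih
        · -- x joins the first segment: segRec (x::xs) = (x :: r :: s) :: ss
          have hr' : isSectionHeader r = false := by simpa using hr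
          have hsx : segRec (x :: xs) = (x :: r :: s) :: ss := by simp [segRec, hX, hr']
          by_cases hl : labelRowB label x = true
          · rw [hsx, if_pos hl, findLoop_true, ← hfl]
            have hfind : searchSegs label ((x :: r :: s) :: ss) = r :: s := by
              simp [searchSegs, List.findIdx?_cons, hl]
            rw [hfind]
            simp only [List.flatten_cons]
            rw [takeWhile_append_all]
            · rw [takeWhile_flatten_nil ss (fun seg hs => hne seg (by simp [hs]))
                  (fun seg hs => hhd seg (by simpa using hs))]
              simp
            · intro a ha
              rcases List.mem_cons.mp ha with h' | h'
              · subst h'; simp [hr']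
              · have := (hne (r :: s) (by simp)).2 a (by simpa using h')
                simp [this]
          · simp only [Bool.not_eq_true] at hl
            rw [hsx, if_neg (by simp [hl]), searchSegs_shift label x (r :: s) ss hl, ← hX]
            exact ih

-- ===== VERDICT =====
theorem find_field_value_spec : Claim_equal_find_field_value := by
  intro rows label _
  unfold Spec_find_field_value find_field_value find_field_value_alt
  rw [segmentsB_eq, main_eq]
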